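-- pv_equiv track=rewrite | github.com/Hadassah1999/ex1_CompBio | part1.py | initialize_spiral_grid
-- ===== SOURCE A (Python) =====
-- def initialize_spiral_grid(size):
--     """
--     Initializes the "grid" array so a "frame" would be created on screen.
--     As generations pass, a spiral shape would be created on screen.
--     """
--     grid = [[1 for _ in range(size)] for _ in range(size)]
--
--     left_b = 1
--     right_b = size - 2
--     top_l = 1
--     bottom_l = size - 2
--
--     for i in range(left_b, right_b + 1):
--         grid[top_l][i] = 0
--         grid[bottom_l][i] = 0
--
--     for i in range(top_l, bottom_l + 1):
--         grid[i][left_b] = 0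
--         grid[i][right_b] = 0
--
--     return grid
-- ===== SOURCE B (Python) =====
-- def initialize_spiral_grid(size):
--     def on_frame(r, c):
--         return ((r == 1 or r == size - 2) and 1 <= c <= size - 2) or \
--                ((c == 1 or c == size - 2) and 1 <= r <= size - 2)
--     return [[0 if on_frame(r, c) else 1 for c in range(size)] for r in range(size)]
-- ===== Notes on version B (the rewrite author's own statement) =====
-- stated objective: simpler
-- what changed: Replaces the fill-then-overwrite mutation (all-1s grid patched by two border loops) with a single nested comprehension that computes each cell directly from a position predicate, never mutating the grid.
import Mathlib
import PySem

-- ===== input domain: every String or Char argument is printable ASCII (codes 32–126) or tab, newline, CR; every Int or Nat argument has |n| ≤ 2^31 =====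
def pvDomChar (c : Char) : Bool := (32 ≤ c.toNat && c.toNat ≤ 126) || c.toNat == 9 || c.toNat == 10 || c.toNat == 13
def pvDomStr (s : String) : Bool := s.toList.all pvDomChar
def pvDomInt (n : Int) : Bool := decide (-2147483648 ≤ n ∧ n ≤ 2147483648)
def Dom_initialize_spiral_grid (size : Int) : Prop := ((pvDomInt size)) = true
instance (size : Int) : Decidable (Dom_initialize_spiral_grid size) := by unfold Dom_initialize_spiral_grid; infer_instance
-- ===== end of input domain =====

-- B replaces A's fill-then-overwrite mutation by one position-predicate comprehension (simpler; same cost).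

-- ===== PORT A =====
-- grid[r][c] = v for the nonnegative indices A's loops produce (exact there: both A's loops run
-- only with indices 1 ≤ i ≤ size-2, which are in range)
def pvSetCell (g : List (List Int)) (r c : Int) (v : Int) : List (List Int) :=
  g.modify r.toNat (fun row => row.set c.toNat v)

def initialize_spiral_grid (size : Int) : List (List Int) :=
  let grid := (PySem.List.pyRange 0 size 1).map
    (fun _ => (PySem.List.pyRange 0 size 1).map (fun _ => (1 : Int)))
  let left_b : Int := 1
  let right_b : Int := size - 2
  let top_l : Int := 1
  let bottom_l : Int := size - 2
  let grid := (PySem.List.pyRange left_b (right_b + 1) 1).foldl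
    (fun g i => pvSetCell (pvSetCell g top_l i 0) bottom_l i 0) grid
  let grid := (PySem.List.pyRange top_l (bottom_l + 1) 1).foldl
    (fun g i => pvSetCell (pvSetCell g i left_b 0) i right_b 0) grid
  grid

-- ===== PORT B =====
def initialize_spiral_grid_alt (size : Int) : List (List Int) :=
  (PySem.List.pyRange 0 size 1).map (fun r =>
    (PySem.List.pyRange 0 size 1).map (fun c =>
      if ((r = 1 ∨ r = size - 2) ∧ 1 ≤ c ∧ c ≤ size - 2)
         ∨ ((c = 1 ∨ c = size - 2) ∧ 1 ≤ r ∧ r ≤ size - 2) then (0 : Int) else 1))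

-- ===== PRECONDITION & SPEC =====
def Spec_initialize_spiral_grid (size : Int) (out : List (List Int)) : Prop := out = initialize_spiral_grid_alt size
instance (size : Int) (out : List (List Int)) : Decidable (Spec_initialize_spiral_grid size out) := by unfold Spec_initialize_spiral_grid; infer_instance

-- ===== CLAIM (what is proved, stated in full; the proofs are below) =====
def Claim_equal_initialize_spiral_grid : Prop := ∀ (size : Int), Dom_initialize_spiral_grid size → Spec_initialize_spiral_grid size (initialize_spiral_grid size)

-- ===== LEMMAS AND PROOFS =====

-- cell accessor
def pvG2 (g : List (List Int)) (r c : Nat) : Option Int := g[r]?.bind (fun row => row[c]?)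

theorem pvG2_setCell (g : List (List Int)) (a b : Int) (r c : Nat) :
    pvG2 (pvSetCell g a b 0) r c =
      if r = a.toNat ∧ c = b.toNat then (pvG2 g r c).map (fun _ => 0) else pvG2 g r c := by
  by_cases hr : r = a.toNat
  · subst hr
    by_cases hc : c = b.toNat
    · subst hc
      rw [if_pos ⟨rfl, rfl⟩]
      simp only [pvSetCell, pvG2, List.getElem?_modify, Option.map_eq_map]
      cases hg : g[a.toNat]? with
      | none => simp
      | some row =>
        simp only [Option.map_some, Option.bind_some, if_true]
        rcases Nat.lt_or_ge b.toNat row.length with h | h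
        · rw [List.getElem?_set_self h, List.getElem?_eq_getElem h]; rfl
        · rw [List.getElem?_set, List.getElem?_eq_none_iff.mpr h]
          simp [Nat.not_lt.mpr h]
    · rw [if_neg (fun h => hc h.2)]
      simp only [pvSetCell, pvG2, List.getElem?_modify, Option.map_eq_map]
      cases hg : g[a.toNat]? with
      | none => simp
      | some row => simp [List.getElem?_set_ne (fun h => hc h.symm)]
  · rw [if_neg (fun h => hr h.1)]
    have h' : a.toNat ≠ r := fun h => hr h.symm
    simp [pvSetCell, pvG2, h']

theorem pvG2_fold_cols (a b : Int) (is : List Int) (g : List (List Int)) (r c : Nat) :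
    pvG2 (is.foldl (fun g i => pvSetCell (pvSetCell g a i 0) b i 0) g) r c =
      if (r = a.toNat ∨ r = b.toNat) ∧ (∃ i ∈ is, c = i.toNat)
      then (pvG2 g r c).map (fun _ => 0) else pvG2 g r c := by
  induction is generalizing g with
  | nil => simp
  | cons i is ih =>
    simp only [List.foldl_cons]
    rw [ih, pvG2_setCell, pvG2_setCell]
    have hX : (if r = b.toNat ∧ c = i.toNat then
          (if r = a.toNat ∧ c = i.toNat then (pvG2 g r c).map (fun _ => 0) else pvG2 g r c).map
            (fun _ => 0)
        else if r = a.toNat ∧ c = i.toNat then (pvG2 g r c).map (fun _ => 0) else pvG2 g r c) =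
        if (r = a.toNat ∨ r = b.toNat) ∧ c = i.toNat then (pvG2 g r c).map (fun _ => 0)
        else pvG2 g r c := by
      by_cases h1 : r = b.toNat ∧ c = i.toNat <;> by_cases h2 : r = a.toNat ∧ c = i.toNat <;>
        simp [h1, h2, Function.comp_def] <;>
        first | tauto | (split <;> simp [Function.comp_def])
    rw [hX]
    have hcons : ((r = a.toNat ∨ r = b.toNat) ∧ ∃ j ∈ i :: is, c = j.toNat) ↔
        (((r = a.toNat ∨ r = b.toNat) ∧ ∃ j ∈ is, c = j.toNat) ∨
          ((r = a.toNat ∨ r = b.toNat) ∧ c = i.toNat)) := by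
      simp only [List.mem_cons]
      constructor
      · rintro ⟨hr, j, (rfl | hj), hc⟩
        · exact Or.inr ⟨hr, hc⟩
        · exact Or.inl ⟨hr, j, hj, hc⟩
      · rintro (⟨hr, j, hj, hc⟩ | ⟨hr, hc⟩)
        · exact ⟨hr, j, Or.inr hj, hc⟩
        · exact ⟨hr, i, Or.inl rfl, hc⟩
    simp only [hcons]
    by_cases h2 : (r = a.toNat ∨ r = b.toNat) ∧ ∃ j ∈ is, c = j.toNat <;>
      by_cases hQ : (r = a.toNat ∨ r = b.toNat) ∧ c = i.toNat <;>
      simp [h2, hQ, Function.comp_def]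
    all_goals split <;> simp [Function.comp_def]

theorem pvG2_fold_rows (a b : Int) (is : List Int) (g : List (List Int)) (r c : Nat) :
    pvG2 (is.foldl (fun g i => pvSetCell (pvSetCell g i a 0) i b 0) g) r c =
      if (c = a.toNat ∨ c = b.toNat) ∧ (∃ i ∈ is, r = i.toNat)
      then (pvG2 g r c).map (fun _ => 0) else pvG2 g r c := by
  induction is generalizing g with
  | nil => simp
  | cons i is ih =>
    simp only [List.foldl_cons]
    rw [ih, pvG2_setCell, pvG2_setCell]
    have hX : (if r = i.toNat ∧ c = b.toNat then
          (if r = i.toNat ∧ c = a.toNat then (pvG2 g r c).map (fun _ => 0) else pvG2 g r c).map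
            (fun _ => 0)
        else if r = i.toNat ∧ c = a.toNat then (pvG2 g r c).map (fun _ => 0) else pvG2 g r c) =
        if (c = a.toNat ∨ c = b.toNat) ∧ r = i.toNat then (pvG2 g r c).map (fun _ => 0)
        else pvG2 g r c := by
      by_cases h1 : r = i.toNat ∧ c = b.toNat <;> by_cases h2 : r = i.toNat ∧ c = a.toNat <;>
        simp [h1, h2, Function.comp_def] <;>
        first | tauto | (split <;> simp [Function.comp_def])
    rw [hX]
    have hcons : ((c = a.toNat ∨ c = b.toNat) ∧ ∃ j ∈ i :: is, r = j.toNat) ↔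
        (((c = a.toNat ∨ c = b.toNat) ∧ ∃ j ∈ is, r = j.toNat) ∨
          ((c = a.toNat ∨ c = b.toNat) ∧ r = i.toNat)) := by
      simp only [List.mem_cons]
      constructor
      · rintro ⟨hc, j, (rfl | hj), hr⟩
        · exact Or.inr ⟨hc, hr⟩
        · exact Or.inl ⟨hc, j, hj, hr⟩
      · rintro (⟨hc, j, hj, hr⟩ | ⟨hc, hr⟩)
        · exact ⟨hc, j, Or.inr hj, hr⟩
        · exact ⟨hc, i, Or.inl rfl, hr⟩
    simp only [hcons]
    by_cases h2 : (c = a.toNat ∨ c = b.toNat) ∧ ∃ j ∈ is, r = j.toNat <;>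
      by_cases hQ : (c = a.toNat ∨ c = b.toNat) ∧ r = i.toNat <;>
      simp [h2, hQ, Function.comp_def]
    all_goals split <;> simp [Function.comp_def]

theorem pvG2_base (size : Int) (r c : Nat) :
    pvG2 ((PySem.List.pyRange 0 size 1).map
      (fun _ => (PySem.List.pyRange 0 size 1).map (fun _ => (1 : Int)))) r c =
      if r < size.toNat ∧ c < size.toNat then some 1 else none := by
  simp only [pvG2, PySem.List.pyRange_one, List.map_map, List.getElem?_map]
  by_cases hr : r < size.toNat
  · rw [List.getElem?_range (by omega : r < (size - 0).toNat)]
    by_cases hc : c < size.toNat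
    · rw [if_pos ⟨hr, hc⟩]
      simp only [Option.map_some, Option.bind_some, Function.comp_apply, List.getElem?_map]
      rw [List.getElem?_range (by omega : c < (size - 0).toNat)]
      simp
    · rw [if_neg (fun h => hc h.2)]
      simp only [Option.map_some, Option.bind_some, Function.comp_apply, List.getElem?_map]
      rw [List.getElem?_eq_none_iff.mpr (by simp only [List.length_range]; omega)]
      simp
  · rw [List.getElem?_eq_none_iff.mpr (by simp only [List.length_range]; omega),
      if_neg (fun h => hr h.1)]
    simp

theorem pvAlt_len (size : Int) : (initialize_spiral_grid_alt size).length = size.toNat := by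
  simp [initialize_spiral_grid_alt, PySem.List.length_pyRange_one]

theorem pvA_len (size : Int) : (initialize_spiral_grid size).length = size.toNat := by
  unfold initialize_spiral_grid
  simp only []
  have hlen : ∀ (is : List Int) (g : List (List Int))
      (f : List (List Int) → Int → List (List Int)),
      (∀ g i, (f g i).length = g.length) → (is.foldl f g).length = g.length := by
    intro is
    induction is with
    | nil => intro g f hf; rfl
    | cons i is ih => intro g f hf; simp only [List.foldl_cons]; rw [ih _ f hf, hf]
  rw [hlen _ _ _ (fun g i => by simp [pvSetCell]),
      hlen _ _ _ (fun g i => by simp [pvSetCell])]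
  simp [PySem.List.length_pyRange_one]

theorem pvG2_alt (size : Int) (r c : Nat) :
    pvG2 (initialize_spiral_grid_alt size) r c =
      if r < size.toNat ∧ c < size.toNat then
        some (if (((r : Int) = 1 ∨ (r : Int) = size - 2) ∧ 1 ≤ (c : Int) ∧ (c : Int) ≤ size - 2)
           ∨ (((c : Int) = 1 ∨ (c : Int) = size - 2) ∧ 1 ≤ (r : Int) ∧ (r : Int) ≤ size - 2)
          then (0 : Int) else 1)
      else none := by
  simp only [initialize_spiral_grid_alt, pvG2, PySem.List.pyRange_one, List.map_map,
    List.getElem?_map]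
  by_cases hr : r < size.toNat
  · rw [List.getElem?_range (by omega : r < (size - 0).toNat)]
    by_cases hc : c < size.toNat
    · rw [if_pos ⟨hr, hc⟩]
      simp only [Option.map_some, Option.bind_some, Function.comp_apply, List.getElem?_map]
      rw [List.getElem?_range (by omega : c < (size - 0).toNat)]
      simp only [Option.map_some, Function.comp_apply, zero_add]
    · rw [if_neg (fun h => hc h.2)]
      simp only [Option.map_some, Option.bind_some, Function.comp_apply, List.getElem?_map]
      rw [List.getElem?_eq_none_iff.mpr (by simp only [List.length_range]; omega)]
      simp
  · rw [List.getElem?_eq_none_iff.mpr (by simp only [List.length_range]; omega),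
      if_neg (fun h => hr h.1)]
    simp

theorem pvG2_A (size : Int) (r c : Nat) :
    pvG2 (initialize_spiral_grid size) r c =
      if r < size.toNat ∧ c < size.toNat then
        some (if (((r : Int) = 1 ∨ (r : Int) = size - 2) ∧ 1 ≤ (c : Int) ∧ (c : Int) ≤ size - 2)
           ∨ (((c : Int) = 1 ∨ (c : Int) = size - 2) ∧ 1 ≤ (r : Int) ∧ (r : Int) ≤ size - 2)
          then (0 : Int) else 1)
      else none := by
  unfold initialize_spiral_grid
  simp only []
  rw [pvG2_fold_rows, pvG2_fold_cols, pvG2_base]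
  have hmemr : (∃ i ∈ PySem.List.pyRange 1 (size - 2 + 1) 1, r = i.toNat) ↔
      (1 ≤ (r : Int) ∧ (r : Int) ≤ size - 2) := by
    constructor
    · rintro ⟨i, hi, rfl⟩
      rw [PySem.List.mem_pyRange_one] at hi; omega
    · intro h
      exact ⟨(r : Int), PySem.List.mem_pyRange_one.mpr (by omega), by omega⟩
  have hmemc : (∃ i ∈ PySem.List.pyRange 1 (size - 2 + 1) 1, c = i.toNat) ↔
      (1 ≤ (c : Int) ∧ (c : Int) ≤ size - 2) := by
    constructor
    · rintro ⟨i, hi, rfl⟩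
      rw [PySem.List.mem_pyRange_one] at hi; omega
    · intro h
      exact ⟨(c : Int), PySem.List.mem_pyRange_one.mpr (by omega), by omega⟩
  by_cases hin : r < size.toNat ∧ c < size.toNat
  · simp only [if_pos hin]
    by_cases hrow : (c = (1 : Int).toNat ∨ c = (size - 2).toNat) ∧
        (∃ i ∈ PySem.List.pyRange 1 (size - 2 + 1) 1, r = i.toNat)
    · rw [if_pos hrow]
      have h2 : (((c : Int) = 1 ∨ (c : Int) = size - 2) ∧ 1 ≤ (r : Int) ∧ (r : Int) ≤ size - 2) := by
        rcases hrow with ⟨hc2, hr2⟩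
        rw [hmemr] at hr2
        refine ⟨?_, hr2⟩; omega
      rw [if_pos (Or.inr h2)]
      split <;> simp
    · rw [if_neg hrow]
      by_cases hcol : (r = (1 : Int).toNat ∨ r = (size - 2).toNat) ∧
          (∃ i ∈ PySem.List.pyRange 1 (size - 2 + 1) 1, c = i.toNat)
      · rw [if_pos hcol]
        have h2 : (((r : Int) = 1 ∨ (r : Int) = size - 2) ∧ 1 ≤ (c : Int) ∧ (c : Int) ≤ size - 2) := by
          rcases hcol with ⟨hr2, hc2⟩
          rw [hmemc] at hc2
          refine ⟨?_, hc2⟩; omega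
        rw [if_pos (Or.inl h2)]
        simp
      · rw [if_neg hcol]
        rw [if_neg ?hP]
        case hP =>
          rintro (⟨ha, hb⟩ | ⟨ha, hb⟩)
          · refine hcol ⟨?_, hmemc.mpr hb⟩
            rcases ha with ha | ha
            · exact Or.inl (by omega)
            · exact Or.inr (by omega)
          · refine hrow ⟨?_, hmemr.mpr hb⟩
            rcases ha with ha | ha
            · exact Or.inl (by omega)
            · exact Or.inr (by omega)
  · simp only [if_neg hin]
    split <;> split <;> simp

-- ===== VERDICT (by name: the statement is the Claim_ definition above) =====
theorem initialize_spiral_grid_spec : Claim_equal_initialize_spiral_grid := by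
  intro size _
  unfold Spec_initialize_spiral_grid
  apply List.ext_getElem?
  intro r
  have hlA := pvA_len size
  have hlB := pvAlt_len size
  by_cases hr : r < size.toNat
  · have hA : ∃ rowA, (initialize_spiral_grid size)[r]? = some rowA :=
      ⟨_, List.getElem?_eq_getElem (by omega)⟩
    have hB : ∃ rowB, (initialize_spiral_grid_alt size)[r]? = some rowB :=
      ⟨_, List.getElem?_eq_getElem (by omega)⟩
    rcases hA with ⟨rowA, hA⟩
    rcases hB with ⟨rowB, hB⟩
    rw [hA, hB]
    congr 1
    apply List.ext_getElem?
    intro c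
    have h1 := pvG2_A size r c
    have h2 := pvG2_alt size r c
    rw [pvG2, hA] at h1
    rw [pvG2, hB] at h2
    simp only [Option.bind_some] at h1 h2
    rw [h1, h2]
  · rw [List.getElem?_eq_none_iff.mpr (by omega), List.getElem?_eq_none_iff.mpr (by omega)]
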